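-- pv_equiv track=rewrite | github.com/VeryLongNicknameSuchWow/aoc2023 | day11/day11.py | parse
-- ===== SOURCE A (Python) =====
-- def parse(lines):
--     arr = [line.strip() for line in lines]
--     rows = len(arr)
--     cols = len(arr[0])
--
--     empty_rows = set()
--     for i in range(rows):
--         if all(c == '.' for c in arr[i]):
--             empty_rows.add(i)
--
--     empty_columns = set()
--     for i in range(cols):
--         if all(row[i] == '.' for row in arr):
--             empty_columns.add(i)
--
--     stars = []
--     for row in range(rows):
--         for col in range(cols):
--             if arr[row][col] == '#':
--                 stars.append((row, col))
--
--     return empty_columns, empty_rows, stars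
-- ===== SOURCE B (Python) =====
-- def parse(lines):
--     arr = [line.strip() for line in lines]
--     rows = len(arr)
--     cols = len(arr[0])
--
--     occupied_rows = set()
--     occupied_cols = set()
--     stars = []
--     for r, row in enumerate(arr):
--         if any(ch != '.' for ch in row):
--             occupied_rows.add(r)
--         for c in range(cols):
--             ch = row[c]
--             if ch != '.':
--                 occupied_cols.add(c)
--                 if ch == '#':
--                     stars.append((r, c))
--
--     empty_rows = set(range(rows)) - occupied_rows
--     empty_columns = set(range(cols)) - occupied_cols
--     return empty_columns, empty_rows, stars
-- ===== Notes on version B (the rewrite author's own statement) =====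
-- stated objective: alternative
-- what changed: B replaces A's three separate scans (per-row all-dot test, nested per-column re-scan over all rows, nested star scan) by one row-major sweep that collects occupied-row/occupied-column sets and the stars, then takes set complements of range(rows)/range(cols).
import Mathlib
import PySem

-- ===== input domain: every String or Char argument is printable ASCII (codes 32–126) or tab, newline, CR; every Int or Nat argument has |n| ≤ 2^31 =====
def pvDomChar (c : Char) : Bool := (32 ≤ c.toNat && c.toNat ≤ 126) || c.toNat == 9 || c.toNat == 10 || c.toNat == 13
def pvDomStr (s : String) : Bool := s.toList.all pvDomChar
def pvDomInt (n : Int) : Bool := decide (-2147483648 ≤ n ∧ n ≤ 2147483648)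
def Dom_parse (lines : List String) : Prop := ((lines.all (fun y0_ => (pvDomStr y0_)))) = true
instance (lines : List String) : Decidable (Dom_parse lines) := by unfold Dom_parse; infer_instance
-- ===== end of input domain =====

-- B does one row-major sweep collecting occupied rows/columns and stars, then complements; A makes three scans.
-- Equivalence is about the return value; neither program mutates its argument.

-- ===== PORT A =====
def parse (lines : List String) : List Int × List Int × (List (Int × Int)) :=
  let arr : List (List Char) := lines.map (fun line => PySem.Chars.strip line.toList)
  let rows : Nat := arr.length
  let cols : Nat := (arr.headD []).length   -- len(arr[0]); Pre_ excludes the empty-lines IndexError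
  let empty_rows : PySem.Set Int :=
    (List.range rows).foldl (fun s i =>
      if (arr.getD i []).all (fun c => c == '.') then PySem.Set.add s (i : Int) else s)
      PySem.Set.empty
  let empty_columns : PySem.Set Int :=
    (List.range cols).foldl (fun s i =>
      -- row[i]: in range for every row under Pre_; the ' ' default is never read there
      if arr.all (fun row => row.getD i ' ' == '.') then PySem.Set.add s (i : Int) else s)
      PySem.Set.empty
  let stars : List (Int × Int) :=
    (List.range rows).foldl (fun st r =>
      (List.range cols).foldl (fun (st : List (Int × Int)) (c : Nat) =>
        if (arr.getD r []).getD c ' ' == '#' then st ++ [((r : Int), (c : Int))] else st) st) []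
  (empty_columns, empty_rows, stars)

-- ===== PORT B =====
def parse_alt (lines : List String) : List Int × List Int × (List (Int × Int)) :=
  let arr : List (List Char) := lines.map (fun line => PySem.Chars.strip line.toList)
  let rows : Nat := arr.length
  let cols : Nat := (arr.headD []).length   -- len(arr[0]); Pre_ excludes the empty-lines IndexError
  -- single sweep: state = (occupied_rows, (occupied_cols, stars)), one component per mutable variable
  let sweep : PySem.Set Int × (PySem.Set Int × List (Int × Int)) :=
    (PySem.List.enumerate arr 0).foldl
      (fun s p =>
        (if p.2.any (fun ch => ch != '.') then PySem.Set.add s.1 p.1 else s.1,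
         ((List.range cols).foldl
            (fun (oc : PySem.Set Int) (c : Nat) => if p.2.getD c ' ' != '.' then PySem.Set.add oc (c : Int) else oc) s.2.1,
          (List.range cols).foldl
            (fun (st : List (Int × Int)) (c : Nat) => if p.2.getD c ' ' != '.' then
                           (if p.2.getD c ' ' == '#' then st ++ [(p.1, (c : Int))] else st)
                         else st) s.2.2)))
      (PySem.Set.empty, (PySem.Set.empty, []))
  let empty_rows : PySem.Set Int :=
    PySem.Set.diff (PySem.Set.ofList ((List.range rows).map (fun i : Nat => (i : Int)))) sweep.1
  let empty_columns : PySem.Set Int :=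
    PySem.Set.diff (PySem.Set.ofList ((List.range cols).map (fun i : Nat => (i : Int)))) sweep.2.1
  (empty_columns, empty_rows, sweep.2.2)

-- ===== PRECONDITION & SPEC =====
-- Pre_ excludes exactly the inputs where the Python raises IndexError: an empty list (arr[0]),
-- or some stripped line shorter than the first one (row[i] / arr[row][col]).
def Pre_parse (lines : List String) : Prop :=
  lines ≠ [] ∧
  ∀ l ∈ lines, (PySem.Chars.strip (lines.headD "").toList).length ≤ (PySem.Chars.strip l.toList).length
instance (lines : List String) : Decidable (Pre_parse lines) := by unfold Pre_parse; infer_instance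
def pvWitness_parse : List String := ["#..", ".x.", "..."]

def Spec_parse (lines : List String) (out : List Int × List Int × (List (Int × Int))) : Prop := out = parse_alt lines
instance (lines : List String) (out : List Int × List Int × (List (Int × Int))) : Decidable (Spec_parse lines out) := by unfold Spec_parse; infer_instance

-- ===== CLAIM (what is proved, stated in full; the proofs are below) =====
def Claim_equal_parse : Prop := ∀ (lines : List String), Dom_parse lines → Pre_parse lines → Spec_parse lines (parse lines)

-- ===== LEMMAS AND PROOFS =====

-- generic helpers
theorem pv_cast_nodup (l : List Nat) (h : l.Nodup) : (l.map (fun i : Nat => (i:Int))).Nodup :=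
  h.map (fun a b hab => by exact_mod_cast hab)

theorem pv_addIf (l : List Nat) (p : Nat → Bool) :
    l.foldl (fun (s : PySem.Set Int) i => if p i then PySem.Set.add s (i:Int) else s) PySem.Set.empty
    = PySem.Set.ofList ((l.filter p).map (fun i : Nat => (i:Int))) := by
  rw [PySem.List.foldl_if_eq_foldl_filter, ← PySem.Set.update_map_eq_foldl_add]
  rw [show (PySem.Set.empty : PySem.Set Int) = [] from rfl, PySem.Set.update_nil_left]

theorem pv_addIf_range (n : Nat) (p : Nat → Bool) :
    (List.range n).foldl (fun (s : PySem.Set Int) i => if p i then PySem.Set.add s (i:Int) else s) PySem.Set.empty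
    = ((List.range n).filter p).map (fun i : Nat => (i:Int)) := by
  rw [pv_addIf, PySem.Set.ofList_eq_self_of_nodup]
  exact pv_cast_nodup _ (List.nodup_range.filter _)

theorem pv_enum (xs : List (List Char)) :
    PySem.List.enumerate xs 0 = (List.range xs.length).map (fun k : Nat => ((k:Int), xs.getD k ([]:List Char))) := by
  rw [PySem.List.enumerate_eq_map_pyRange (d := [])]
  rw [show PySem.List.len xs = ((xs.length : Nat) : Int) from by simp [PySem.List.len],
      PySem.List.pyRange_zero_nat, List.map_map]
  refine List.map_congr_left (fun k hk => ?_)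
  simp [PySem.List.pyGetD_natCast]

-- membership in an add-if fold
theorem pv_mem_addIf (l : List Nat) (p : Nat → Bool) (s : PySem.Set Int) (x : Int) :
    x ∈ l.foldl (fun (s : PySem.Set Int) c => if p c then PySem.Set.add s (c:Int) else s) s
    ↔ x ∈ s ∨ ∃ c ∈ l, p c = true ∧ x = (c:Int) := by
  rw [PySem.List.foldl_if_eq_foldl_filter]
  rw [show (fun (s : PySem.Set Int) (c : Nat) => PySem.Set.add s (c:Int))
        = (fun (s : PySem.Set Int) (c : Nat) => PySem.Set.add s ((fun i : Nat => (i:Int)) c)) from rfl]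
  rw [PySem.Set.mem_foldl_add]
  simp [List.mem_filter, and_assoc]

-- membership through the outer occupied-columns fold
theorem pv_mem_occC (cols : Nat) (rs : List (List Char)) (s : PySem.Set Int) (x : Int) :
    x ∈ rs.foldl (fun oc row => (List.range cols).foldl
          (fun (oc : PySem.Set Int) (c : Nat) => if row.getD c ' ' != '.' then PySem.Set.add oc (c:Int) else oc) oc) s
    ↔ x ∈ s ∨ ∃ row ∈ rs, ∃ c ∈ List.range cols, (row.getD c ' ' != '.') = true ∧ x = (c:Int) := by
  induction rs generalizing s with
  | nil => simp
  | cons row rest ih =>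
    rw [List.foldl_cons, ih, pv_mem_addIf]
    simp only [List.mem_cons]
    constructor
    · rintro ((hx | ⟨c, hc, h1, h2⟩) | ⟨row', hr, c, hc, h1, h2⟩)
      · exact Or.inl hx
      · exact Or.inr ⟨row, Or.inl rfl, c, hc, h1, h2⟩
      · exact Or.inr ⟨row', Or.inr hr, c, hc, h1, h2⟩
    · rintro (hx | ⟨row', (rfl | hr), c, hc, h1, h2⟩)
      · exact Or.inl (Or.inl hx)
      · exact Or.inl (Or.inr ⟨c, hc, h1, h2⟩)
      · exact Or.inr ⟨row', hr, c, hc, h1, h2⟩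

-- the star inner loop appends exactly the '#' columns
theorem pv_stars_inner (cols : Nat) (r : Int) (row : List Char) (st : List (Int × Int)) :
    (List.range cols).foldl
      (fun (st : List (Int × Int)) (c : Nat) => if row.getD c ' ' != '.' then
          (if row.getD c ' ' == '#' then st ++ [(r, (c:Int))] else st) else st) st
    = st ++ ((List.range cols).filter (fun c => row.getD c ' ' == '#')).map (fun c : Nat => (r, (c:Int))) := by
  rw [show (fun (st : List (Int × Int)) (c : Nat) => if row.getD c ' ' != '.' then
          (if row.getD c ' ' == '#' then st ++ [(r, (c:Int))] else st) else st)
        = (fun (st : List (Int × Int)) (c : Nat) => if row.getD c ' ' == '#' then st ++ [(fun c : Nat => (r, (c:Int))) c] else st) from ?_]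
  · exact PySem.List.foldl_append_if _ _ _ _
  · funext st c
    by_cases h : row.getD c ' ' = '#'
    · rw [h]; simp
    · simp only [List.getD_eq_getElem?_getD] at h ⊢
      simp [h]

-- Bool: all-dots vs any-non-dot
theorem pv_all_not_any {α : Type} (l : List α) (g : α → Char) :
    (l.all (fun a => g a == '.')) = !(l.any (fun a => g a != '.')) := by
  induction l with
  | nil => rfl
  | cons c cs ih => simp [List.all_cons, List.any_cons, ih, bne]

theorem pv_map_getD (l : List (List Char)) :
    (List.range l.length).map (fun k => l.getD k []) = l := by
  refine List.ext_getElem (by simp) (fun i h1 h2 => ?_)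
  simp only [List.getElem_map, List.getElem_range]
  simp [List.getD_eq_getElem?_getD, List.getElem?_eq_getElem (by simpa using h2)]

-- ==== main equality over a generic grid ====
theorem pv_main (arr : List (List Char)) (cols : Nat) :
    (let rows := arr.length
     ((List.range cols).foldl (fun s i =>
        if arr.all (fun row => row.getD i ' ' == '.') then PySem.Set.add s (i : Int) else s) PySem.Set.empty,
      (List.range rows).foldl (fun s i =>
        if (arr.getD i []).all (fun c => c == '.') then PySem.Set.add s (i : Int) else s) PySem.Set.empty,
      (List.range rows).foldl (fun st r =>
        (List.range cols).foldl (fun st c =>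
          if (arr.getD r []).getD c ' ' == '#' then st ++ [((r : Int), (c : Int))] else st) st) []))
    =
    (let rows := arr.length
     let sweep :=
       (PySem.List.enumerate arr 0).foldl
         (fun s p =>
           (if p.2.any (fun ch => ch != '.') then PySem.Set.add s.1 p.1 else s.1,
            ((List.range cols).foldl
               (fun (oc : PySem.Set Int) (c : Nat) => if p.2.getD c ' ' != '.' then PySem.Set.add oc (c : Int) else oc) s.2.1,
             (List.range cols).foldl
               (fun (st : List (Int × Int)) (c : Nat) => if p.2.getD c ' ' != '.' then
                              (if p.2.getD c ' ' == '#' then st ++ [(p.1, (c : Int))] else st)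
                            else st) s.2.2)))
         (PySem.Set.empty, (PySem.Set.empty, []))
     (PySem.Set.diff (PySem.Set.ofList ((List.range cols).map (fun i : Nat => (i : Int)))) sweep.2.1,
      PySem.Set.diff (PySem.Set.ofList ((List.range rows).map (fun i : Nat => (i : Int)))) sweep.1,
      sweep.2.2)) := by
  dsimp only
  rw [pv_enum arr, List.foldl_map]
  dsimp only
  rw [PySem.List.foldl_prod_mk
        (f := fun (s : PySem.Set Int) (k : Nat) =>
          if (arr.getD k []).any (fun ch => ch != '.') then PySem.Set.add s (k : Int) else s)
        (g := fun (t : PySem.Set Int × List (Int × Int)) (k : Nat) =>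
          ((List.range cols).foldl
             (fun (oc : PySem.Set Int) (c : Nat) =>
               if (arr.getD k []).getD c ' ' != '.' then PySem.Set.add oc (c : Int) else oc) t.1,
           (List.range cols).foldl
             (fun (st : List (Int × Int)) (c : Nat) =>
               if (arr.getD k []).getD c ' ' != '.' then
                 (if (arr.getD k []).getD c ' ' == '#' then st ++ [((k : Int), (c : Int))] else st)
               else st) t.2))]
  rw [PySem.List.foldl_prod_mk
        (f := fun (oc : PySem.Set Int) (k : Nat) =>
          (List.range cols).foldl
             (fun (oc : PySem.Set Int) (c : Nat) =>
               if (arr.getD k []).getD c ' ' != '.' then PySem.Set.add oc (c : Int) else oc) oc)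
        (g := fun (st : List (Int × Int)) (k : Nat) =>
          (List.range cols).foldl
             (fun (st : List (Int × Int)) (c : Nat) =>
               if (arr.getD k []).getD c ' ' != '.' then
                 (if (arr.getD k []).getD c ' ' == '#' then st ++ [((k : Int), (c : Int))] else st)
               else st) st)]
  dsimp only
  simp only [pv_addIf_range]
  -- A stars inner loop => append of filtered '#' columns
  rw [show (fun (st : List (Int × Int)) (r : Nat) =>
        (List.range cols).foldl
          (fun st c => if (arr.getD r []).getD c ' ' == '#' then st ++ [((r : Int), (c : Int))] else st) st)
      = (fun (st : List (Int × Int)) (r : Nat) =>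
          st ++ ((List.range cols).filter (fun c => (arr.getD r []).getD c ' ' == '#')).map
                  (fun c : Nat => ((r : Int), (c : Int)))) from
      funext fun st => funext fun r => PySem.List.foldl_append_if _ _ _ _]
  -- B stars inner loop => the same append
  rw [show (fun (st : List (Int × Int)) (k : Nat) =>
        (List.range cols).foldl
          (fun st c => if (arr.getD k []).getD c ' ' != '.' then
              (if (arr.getD k []).getD c ' ' == '#' then st ++ [((k : Int), (c : Int))] else st)
            else st) st)
      = (fun (st : List (Int × Int)) (k : Nat) =>
          st ++ ((List.range cols).filter (fun c => (arr.getD k []).getD c ' ' == '#')).map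
                  (fun c : Nat => ((k : Int), (c : Int)))) from
      funext fun st => funext fun k => pv_stars_inner cols (k : Int) (arr.getD k []) st]
  -- occupied-columns fold over indices = fold over the rows themselves
  rw [show (List.range arr.length).foldl
        (fun oc k => (List.range cols).foldl
          (fun (oc : PySem.Set Int) (c : Nat) =>
            if (arr.getD k []).getD c ' ' != '.' then PySem.Set.add oc (c : Int) else oc) oc)
        PySem.Set.empty
      = arr.foldl
        (fun oc row => (List.range cols).foldl
          (fun (oc : PySem.Set Int) (c : Nat) =>
            if row.getD c ' ' != '.' then PySem.Set.add oc (c : Int) else oc) oc)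
        PySem.Set.empty from by
      conv_rhs => rw [← pv_map_getD arr]
      rw [List.foldl_map]]
  simp only [Prod.mk.injEq]
  refine ⟨?_, ?_, ?_⟩
  · rw [PySem.Set.ofList_eq_self_of_nodup _ (pv_cast_nodup _ List.nodup_range)]
    rw [show ∀ (s t : PySem.Set Int), PySem.Set.diff s t = s.filter (fun x => !(PySem.Set.contains t x)) from fun s t => rfl]
    rw [List.filter_map]
    congr 1
    refine List.filter_congr fun i hi => ?_
    simp only [List.mem_range] at hi
    have hc : PySem.Set.contains
        (arr.foldl
          (fun oc row => (List.range cols).foldl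
            (fun (oc : PySem.Set Int) (c : Nat) =>
              if row.getD c ' ' != '.' then PySem.Set.add oc (c : Int) else oc) oc)
          PySem.Set.empty) (i : Int)
        = arr.any (fun row => row.getD i ' ' != '.') := by
      rw [Bool.eq_iff_iff, PySem.Set.contains_iff, List.any_eq_true, pv_mem_occC]
      constructor
      · rintro (h | ⟨row, hr, c, hc2, h1, h2⟩)
        · simp [PySem.Set.empty] at h
        · exact ⟨row, hr, by rwa [Nat.cast_inj.mp h2]⟩
      · rintro ⟨row, hr, h1⟩
        exact Or.inr ⟨row, hr, i, by simpa using hi, h1, rfl⟩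
    simp only [Function.comp, hc, pv_all_not_any arr (fun row => row.getD i ' ')]
  · rw [PySem.Set.ofList_eq_self_of_nodup _ (pv_cast_nodup _ List.nodup_range)]
    rw [show ∀ (s t : PySem.Set Int), PySem.Set.diff s t = s.filter (fun x => !(PySem.Set.contains t x)) from fun s t => rfl]
    rw [List.filter_map]
    congr 1
    refine List.filter_congr fun i hi => ?_
    simp only [List.mem_range] at hi
    have hc : PySem.Set.contains
        (((List.range arr.length).filter (fun k => (arr.getD k []).any (fun ch => ch != '.'))).map
          (fun i : Nat => (i : Int))) (i : Int)
        = (arr.getD i []).any (fun ch => ch != '.') := by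
      rw [Bool.eq_iff_iff, PySem.Set.contains_iff]
      simp only [List.mem_map, List.mem_filter, List.mem_range]
      constructor
      · rintro ⟨k, ⟨hk, hp⟩, he⟩
        rwa [← Nat.cast_inj.mp he]
      · intro hp
        exact ⟨i, ⟨hi, hp⟩, rfl⟩
    simp only [Function.comp, hc, pv_all_not_any (arr.getD i []) (fun c => c)]
  · trivial

-- ===== VERDICT (by name: the statement is the Claim_ definition above) =====
theorem parse_spec : Claim_equal_parse := by
  intro lines _ _
  show parse lines = parse_alt lines
  exact pv_main (lines.map (fun line => PySem.Chars.strip line.toList))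
    (((lines.map (fun line => PySem.Chars.strip line.toList)).headD []).length)
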